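-- pv_equiv track=rewrite | github.com/zaayn/stego_tesis | EmbedMethod.py | embedding
-- ===== SOURCE A (Python) =====
-- import copy
--
-- def embedding(processed_payload, index_bit, interpolated_sample, divided, last_index):
--     new_data = copy.copy(interpolated_sample)
--     index_divided = 0
--     for x in range(len(interpolated_sample)):
--         for y in range(len(index_bit)):
--             if(x == index_bit[y]):
--                 new_data[x] += processed_payload[y]
--
--         if(x > last_index and x < last_index+len(divided)):
--             new_data[x] += divided[index_divided]
--             index_divided+=1
--     return new_data
-- ===== SOURCE B (Python) =====
-- def embedding(processed_payload, index_bit, interpolated_sample, divided, last_index):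
--     n = len(interpolated_sample)
--     add = [0] * n
--     for p, i in zip(processed_payload, index_bit):
--         if 0 <= i < n:
--             add[i] += p
--     new_data = [s + a for s, a in zip(interpolated_sample, add)]
--     start = max(0, last_index + 1)
--     end = min(n, last_index + len(divided))
--     for x in range(start, end):
--         new_data[x] += divided[x - start]
--     return new_data
-- ===== Notes on version B (the rewrite author's own statement) =====
-- stated objective: faster
-- what changed: Replaced the nested scan of index_bit for every sample (and the running divided counter) by a single pass that scatters zip(processed_payload, index_bit) into an additive bucket array, then one vectorised add of samples plus one contiguous slice-loop over the divided window computed in closed form.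
import Mathlib
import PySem

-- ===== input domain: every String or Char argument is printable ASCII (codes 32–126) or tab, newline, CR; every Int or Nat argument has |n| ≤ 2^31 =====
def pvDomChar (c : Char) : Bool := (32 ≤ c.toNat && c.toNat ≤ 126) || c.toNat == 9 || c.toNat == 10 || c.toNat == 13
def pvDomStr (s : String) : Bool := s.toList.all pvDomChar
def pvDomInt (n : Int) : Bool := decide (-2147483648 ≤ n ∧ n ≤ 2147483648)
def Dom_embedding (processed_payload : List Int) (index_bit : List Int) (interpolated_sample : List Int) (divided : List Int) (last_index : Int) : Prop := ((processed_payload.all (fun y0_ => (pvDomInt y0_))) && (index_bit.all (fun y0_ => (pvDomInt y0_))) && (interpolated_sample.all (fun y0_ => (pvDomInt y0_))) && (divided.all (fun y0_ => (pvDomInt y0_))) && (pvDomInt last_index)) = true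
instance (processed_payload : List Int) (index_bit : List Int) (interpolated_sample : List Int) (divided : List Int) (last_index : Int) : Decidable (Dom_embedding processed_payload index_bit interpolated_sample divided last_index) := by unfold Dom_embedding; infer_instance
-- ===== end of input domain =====

-- B embeds via one bucket-scatter pass over zip(payload, index_bit) plus a closed-form divided window, instead of A's per-sample rescan of index_bit and running counter (objective: faster by algorithm change; equality proved on Pre_).

-- ===== PORT A =====
-- literal port of A: outer loop over sample positions, inner loop over all of index_bit,
-- running counter index_divided; pyGetD stands for Python indexing (Pre_ excludes the
-- inputs where Python's processed_payload[y] raises IndexError).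
def embedding (processed_payload : List Int) (index_bit : List Int) (interpolated_sample : List Int) (divided : List Int) (last_index : Int) : List Int :=
  ((List.range interpolated_sample.length).foldl
    (fun (st : List Int × Int) (x : Nat) =>
      let nd := (List.range index_bit.length).foldl
        (fun (nd : List Int) (y : Nat) =>
          if (x : Int) = PySem.List.pyGetD index_bit (y : Int) 0 then
            nd.set x (nd.getD x 0 + PySem.List.pyGetD processed_payload (y : Int) 0)
          else nd) st.1
      if last_index < (x : Int) ∧ (x : Int) < last_index + divided.length then
        (nd.set x (nd.getD x 0 + PySem.List.pyGetD divided st.2 0), st.2 + 1)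
      else (nd, st.2))
    (interpolated_sample, 0)).1

-- ===== PORT B =====
-- literal port of Source B: scatter zip(payload, index_bit) into a bucket array `add`,
-- add it pointwise to the samples, then one contiguous loop over the divided window.
def embedding_alt (processed_payload : List Int) (index_bit : List Int) (interpolated_sample : List Int) (divided : List Int) (last_index : Int) : List Int :=
  let n : Int := interpolated_sample.length
  let add := (processed_payload.zip index_bit).foldl
    (fun (a : List Int) (q : Int × Int) =>
      if 0 ≤ q.2 ∧ q.2 < n then a.set q.2.toNat (a.getD q.2.toNat 0 + q.1) else a)
    (List.replicate interpolated_sample.length 0)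
  let new_data := (interpolated_sample.zip add).map (fun q => q.1 + q.2)
  let start := max 0 (last_index + 1)
  let stop := min n (last_index + divided.length)
  (PySem.List.pyRange start stop 1).foldl
    (fun (nd : List Int) (x : Int) =>
      nd.set x.toNat (nd.getD x.toNat 0 + PySem.List.pyGetD divided (x - start) 0))
    new_data

-- ===== PRECONDITION & SPEC =====
-- Pre_ excludes exactly the inputs where Python A raises IndexError on processed_payload[y]:
-- an in-range index_bit entry (0 ≤ index_bit[y] < len(interpolated_sample)) sitting at a
-- position y ≥ len(processed_payload).  B returns the embedded samples there.
def Pre_embedding (processed_payload : List Int) (index_bit : List Int) (interpolated_sample : List Int) (divided : List Int) (last_index : Int) : Prop :=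
  ∀ p ∈ index_bit.zipIdx, processed_payload.length ≤ p.2 →
    ¬ (0 ≤ p.1 ∧ p.1 < (interpolated_sample.length : Int))
instance (processed_payload : List Int) (index_bit : List Int) (interpolated_sample : List Int) (divided : List Int) (last_index : Int) : Decidable (Pre_embedding processed_payload index_bit interpolated_sample divided last_index) := by unfold Pre_embedding; infer_instance
def pvWitness_embedding : List Int × List Int × List Int × List Int × Int := ([1], [0], [10, 20], [7], 0)

def Spec_embedding (processed_payload : List Int) (index_bit : List Int) (interpolated_sample : List Int) (divided : List Int) (last_index : Int) (out : List Int) : Prop := out = embedding_alt processed_payload index_bit interpolated_sample divided last_index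
instance (processed_payload : List Int) (index_bit : List Int) (interpolated_sample : List Int) (divided : List Int) (last_index : Int) (out : List Int) : Decidable (Spec_embedding processed_payload index_bit interpolated_sample divided last_index out) := by unfold Spec_embedding; infer_instance

-- ===== CLAIM (what is proved, stated in full; the proofs are below) =====
def Claim_equal_embedding : Prop := ∀ (processed_payload : List Int) (index_bit : List Int) (interpolated_sample : List Int) (divided : List Int) (last_index : Int), Dom_embedding processed_payload index_bit interpolated_sample divided last_index → Pre_embedding processed_payload index_bit interpolated_sample divided last_index → Spec_embedding processed_payload index_bit interpolated_sample divided last_index (embedding processed_payload index_bit interpolated_sample divided last_index)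
-- ===== LEMMAS AND PROOFS =====

-- payload mass landing on sample position c, in A's form (scan of index positions)
def paySumA (pp ib : List Int) (c : Int) : Int :=
  (((List.range ib.length).filter
      (fun (y : Nat) => decide (c = PySem.List.pyGetD ib (y : Int) 0))).map
    (fun (y : Nat) => PySem.List.pyGetD pp (y : Int) 0)).sum

-- payload mass landing on sample position c, in B's form (scan of zipped pairs)
def paySumB (pp ib : List Int) (c : Int) : Int :=
  (((pp.zip ib).filter (fun q => decide (q.2 = c))).map (fun q => q.1)).sum

def startOf (li : Int) : Int := max 0 (li + 1)

-- A's running counter index_divided after m outer iterations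
def idxAt (d : List Int) (li : Int) (m : Nat) : Int :=
  max 0 (min (m : Int) (li + d.length) - startOf li)

-- contribution of the divided window at position j
def divAdd (d : List Int) (li : Int) (j : Int) : Int :=
  if li < j ∧ j < li + d.length then PySem.List.pyGetD d (j - startOf li) 0 else 0

-- generic: a guarded fold that only ever adds v a into cell k a
theorem foldl_guard_set {α : Type} (P : α → Prop) [DecidablePred P] (k : α → Nat) (v : α → Int) :
    ∀ (l : List α) (nd : List Int), (∀ a ∈ l, P a → k a < nd.length) →
      ((l.foldl (fun nd a => if P a then nd.set (k a) (nd.getD (k a) 0 + v a) else nd) nd).length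
          = nd.length
        ∧ ∀ j : Nat,
          (l.foldl (fun nd a => if P a then nd.set (k a) (nd.getD (k a) 0 + v a) else nd) nd).getD j 0
            = nd.getD j 0 + ((l.filter (fun a => decide (P a ∧ k a = j))).map v).sum) := by
  intro l
  induction l with
  | nil => intro nd _; simp
  | cons a l ih =>
    intro nd hk
    have hlen : (if P a then nd.set (k a) (nd.getD (k a) 0 + v a) else nd).length = nd.length := by
      split <;> simp
    have ih' := ih (if P a then nd.set (k a) (nd.getD (k a) 0 + v a) else nd)
      (by intro b hb hPb; rw [hlen]; exact hk b (List.mem_cons_of_mem _ hb) hPb)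
    refine ⟨ih'.1.trans hlen, ?_⟩
    intro j
    have hstep : (if P a then nd.set (k a) (nd.getD (k a) 0 + v a) else nd).getD j 0
        = nd.getD j 0 + (if P a ∧ k a = j then v a else 0) := by
      by_cases hP : P a
      · by_cases hj : k a = j
        · subst hj
          have hlt : k a < nd.length := hk a (List.mem_cons_self) hP
          simp [hP, List.getD_eq_getElem?_getD, List.getElem?_set_self', hlt,
            List.getElem?_eq_getElem, hlt]
        · simp [hP, hj, List.getD_eq_getElem?_getD, List.getElem?_set_ne hj]
      · simp [hP]
    calc ((a :: l).foldl (fun nd a => if P a then nd.set (k a) (nd.getD (k a) 0 + v a) else nd) nd).getD j 0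
        = (if P a then nd.set (k a) (nd.getD (k a) 0 + v a) else nd).getD j 0
            + ((l.filter (fun a => decide (P a ∧ k a = j))).map v).sum := by
          simpa using ih'.2 j
      _ = nd.getD j 0 + (((a :: l).filter (fun a => decide (P a ∧ k a = j))).map v).sum := by
          rw [hstep]
          by_cases hc : P a ∧ k a = j <;> simp [hc] <;> ring

-- generic: an unguarded fold that adds v a into cell k a
theorem foldl_set_add {α : Type} (k : α → Nat) (v : α → Int) :
    ∀ (l : List α) (nd : List Int), (∀ a ∈ l, k a < nd.length) →
      ((l.foldl (fun nd a => nd.set (k a) (nd.getD (k a) 0 + v a)) nd).length = nd.length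
        ∧ ∀ j : Nat,
          (l.foldl (fun nd a => nd.set (k a) (nd.getD (k a) 0 + v a)) nd).getD j 0
            = nd.getD j 0 + ((l.filter (fun a => decide (k a = j))).map v).sum) := by
  intro l nd hk
  have h := foldl_guard_set (fun _ : α => True) k v l nd (by intro a ha _; exact hk a ha)
  have hfun : (fun (nd : List Int) (a : α) =>
      if True then nd.set (k a) (nd.getD (k a) 0 + v a) else nd)
      = fun (nd : List Int) (a : α) => nd.set (k a) (nd.getD (k a) 0 + v a) := by
    funext nd a; simp
  rw [hfun] at h
  simpa using h

theorem getD_tail (l : List Int) (y : Nat) : l.getD (y + 1) 0 = l.tail.getD y 0 := by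
  cases l <;> simp

-- structural step for paySumA
theorem paySumA_cons (pp : List Int) (i : Int) (ib : List Int) (c : Int) :
    paySumA pp (i :: ib) c = (if c = i then pp.getD 0 0 else 0) + paySumA pp.tail ib c := by
  unfold paySumA
  simp only [List.length_cons]
  rw [List.range_succ_eq_map]
  rw [List.filter_cons, List.filter_map]
  by_cases hc : c = i
  · simp only [Nat.cast_zero, PySem.List.pyGetD_zero_cons]
    simp only [hc, decide_true, if_pos]
    simp [Function.comp_def, List.map_map, PySem.List.pyGetD_natCast, getD_tail,
      List.getD_cons_succ, hc]
    rfl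
  · simp only [Nat.cast_zero, PySem.List.pyGetD_zero_cons]
    simp [hc, Function.comp_def, List.map_map, PySem.List.pyGetD_natCast, getD_tail,
      List.getD_cons_succ]
    rfl

theorem paySumA_nil_pp (ib : List Int) (c : Int) : paySumA [] ib c = 0 := by
  unfold paySumA
  have : ∀ y ∈ (List.range ib.length).filter
      (fun (y : Nat) => decide (c = PySem.List.pyGetD ib (y : Int) 0)),
      PySem.List.pyGetD ([] : List Int) (y : Int) 0 = 0 := by
    intro y _; simp [PySem.List.pyGetD_natCast]
  rw [List.map_congr_left this]
  simp

theorem paySum_eq (ib : List Int) : ∀ (pp : List Int) (c : Int), paySumA pp ib c = paySumB pp ib c := by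
  induction ib with
  | nil => intro pp c; simp [paySumA, paySumB]
  | cons i ib ih =>
    intro pp c
    cases pp with
    | nil => simp [paySumA_nil_pp, paySumB]
    | cons p pp =>
      rw [paySumA_cons]
      have : paySumB (p :: pp) (i :: ib) c = (if i = c then p else 0) + paySumB pp ib c := by
        unfold paySumB
        rw [List.zip_cons_cons, List.filter_cons]
        by_cases hc : i = c <;> simp [hc]
      rw [this, ih]
      by_cases hc : c = i
      · simp [hc]
      · simp [hc, Ne.symm hc]

-- the elements of pyRange a b 1 that hit Nat cell j (for 0 ≤ a)
theorem filter_pyRange_toNat (j : Nat) :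
    ∀ (m : Nat) (a b : Int), 0 ≤ a → m = (b - a).toNat →
      (PySem.List.pyRange a b 1).filter (fun x => decide (x.toNat = j))
        = if a ≤ (j : Int) ∧ (j : Int) < b then [(j : Int)] else [] := by
  intro m
  induction m with
  | zero =>
    intro a b ha hm
    have hba : b ≤ a := by omega
    rw [PySem.List.pyRange_one_eq_nil hba]
    have : ¬ (a ≤ (j : Int) ∧ (j : Int) < b) := by omega
    simp [this]
  | succ m ih =>
    intro a b ha hm
    have hab : a < b := by omega
    rw [PySem.List.pyRange_one_cons hab, List.filter_cons]
    have ih' := ih (a + 1) b (by omega) (by omega)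
    by_cases hj : a.toNat = j
    · have haj : a = (j : Int) := by omega
      have : ¬ ((a + 1) ≤ (j : Int) ∧ (j : Int) < b) := by omega
      rw [ih']
      simp only [hj, haj, this, if_neg, decide_true, if_pos]
      have : (j : Int) < b := by omega
      simp [this, haj]
    · have : (a ≤ (j : Int) ∧ (j : Int) < b) ↔ ((a + 1) ≤ (j : Int) ∧ (j : Int) < b) := by omega
      rw [ih']
      simp [hj, this]

-- characterisation of port A: same length as the samples, and elementwise value
-- A's outer loop body, named for the proofs (definitionally the lambda in `embedding`)
def stepA (pp ib d : List Int) (li : Int) (st : List Int × Int) (x : Nat) : List Int × Int :=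
  let nd := (List.range ib.length).foldl
    (fun (nd : List Int) (y : Nat) =>
      if (x : Int) = PySem.List.pyGetD ib (y : Int) 0 then
        nd.set x (nd.getD x 0 + PySem.List.pyGetD pp (y : Int) 0)
      else nd) st.1
  if li < (x : Int) ∧ (x : Int) < li + d.length then
    (nd.set x (nd.getD x 0 + PySem.List.pyGetD d st.2 0), st.2 + 1)
  else (nd, st.2)

theorem embedding_eq_stepA (pp ib s d : List Int) (li : Int) :
    embedding pp ib s d li = ((List.range s.length).foldl (stepA pp ib d li) (s, 0)).1 := rfl

theorem getD_set_self (l : List Int) (i : Nat) (x : Int) (h : i < l.length) :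
    (l.set i x).getD i 0 = x := by
  simp [List.getD_eq_getElem?_getD, List.getElem?_eq_getElem, h]

theorem getD_set_ne (l : List Int) (i j : Nat) (x : Int) (h : ¬ i = j) :
    (l.set i x).getD j 0 = l.getD j 0 := by
  simp [List.getD_eq_getElem?_getD, List.getElem?_set_ne h]

-- invariant of A's outer loop after m iterations
theorem embedding_char (pp ib s d : List Int) (li : Int) :
    ∀ (m : Nat), m ≤ s.length →
      ((List.range m).foldl (stepA pp ib d li) (s, 0)).1.length = s.length
        ∧ ((List.range m).foldl (stepA pp ib d li) (s, 0)).2 = idxAt d li m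
        ∧ ∀ j : Nat, ((List.range m).foldl (stepA pp ib d li) (s, 0)).1.getD j 0
            = s.getD j 0 + (if j < m then paySumA pp ib (j : Int) + divAdd d li (j : Int) else 0) := by
  intro m
  induction m with
  | zero =>
    intro _
    refine ⟨rfl, by simp only [List.range_zero, List.foldl_nil, idxAt, startOf]; omega, ?_⟩
    intro j; simp
  | succ m ih =>
    intro hm1
    have hm : m < s.length := hm1
    obtain ⟨hl, hi, hv⟩ := ih (le_of_lt hm)
    rw [List.range_succ, List.foldl_append, List.foldl_cons, List.foldl_nil]
    set st := (List.range m).foldl (stepA pp ib d li) (s, 0) with hst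
    have hinner := foldl_guard_set
      (fun y : Nat => (m : Int) = PySem.List.pyGetD ib (y : Int) 0)
      (fun _ => m) (fun y => PySem.List.pyGetD pp (y : Int) 0)
      (List.range ib.length) st.1 (by intro a _ _; rw [hl]; exact hm)
    set nd := (List.range ib.length).foldl
      (fun (nd : List Int) (y : Nat) =>
        if (m : Int) = PySem.List.pyGetD ib (y : Int) 0 then
          nd.set m (nd.getD m 0 + PySem.List.pyGetD pp (y : Int) 0)
        else nd) st.1 with hnd
    have hndlen : nd.length = s.length := by rw [hnd, hinner.1, hl]
    have hndval : ∀ j : Nat, nd.getD j 0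
        = st.1.getD j 0 + (if j = m then paySumA pp ib (m : Int) else 0) := by
      intro j
      rw [hnd, hinner.2 j]
      by_cases hj : j = m
      · rw [if_pos hj]
        have he : (List.range ib.length).filter
              (fun (a : Nat) => decide (((m : Int) = PySem.List.pyGetD ib (a : Int) 0) ∧ (fun _ : Nat => m) a = j))
            = (List.range ib.length).filter
              (fun (y : Nat) => decide ((m : Int) = PySem.List.pyGetD ib (y : Int) 0)) := by
          apply List.filter_congr; intro y _; simp [hj]
        rw [he]; rfl
      · have he : (List.range ib.length).filter
              (fun (a : Nat) => decide (((m : Int) = PySem.List.pyGetD ib (a : Int) 0) ∧ (fun _ : Nat => m) a = j))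
            = [] := by
          apply List.filter_eq_nil_iff.mpr; intro y _; simp; intro _; omega
        rw [he]; simp [hj]
    have hmain : stepA pp ib d li st m
        = (if li < (m : Int) ∧ (m : Int) < li + d.length then
            (nd.set m (nd.getD m 0 + PySem.List.pyGetD d st.2 0), st.2 + 1)
          else (nd, st.2)) := rfl
    rw [hmain]
    by_cases hw : li < (m : Int) ∧ (m : Int) < li + d.length
    · rw [if_pos hw]
      refine ⟨by simpa using hndlen, ?_, ?_⟩
      · simp only [hi, idxAt, startOf]; omega
      · intro j
        by_cases hj : j = m
        · have hdiv : PySem.List.pyGetD d st.2 0 = divAdd d li (m : Int) := by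
            rw [hi, divAdd, if_pos hw]
            congr 1
            simp only [idxAt, startOf]; omega
          subst hj
          rw [getD_set_self nd j _ (by omega : j < nd.length), hndval j, if_pos rfl,
            hv j, if_neg (by omega), hdiv, if_pos (by omega)]
          ring
        · rw [getD_set_ne nd m j _ (by omega), hndval j, if_neg hj, hv j]
          have hiff : (j < m + 1) ↔ (j < m) := by omega
          simp only [hiff]
          ring
    · rw [if_neg hw]
      refine ⟨by simpa using hndlen, ?_, ?_⟩
      · simp only [hi, idxAt, startOf]; omega
      · intro j
        by_cases hj : j = m
        · subst hj
          rw [hndval j, if_pos rfl, hv j, if_neg (by omega), if_pos (by omega)]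
          have hz : divAdd d li (j : Int) = 0 := by rw [divAdd, if_neg hw]
          rw [hz]; ring
        · rw [hndval j, if_neg hj, hv j]
          have hiff : (j < m + 1) ↔ (j < m) := by omega
          simp only [hiff]
          ring

theorem embedding_alt_eq (pp ib s d : List Int) (li : Int) :
    embedding_alt pp ib s d li
      = (PySem.List.pyRange (max 0 (li + 1)) (min (s.length : Int) (li + d.length)) 1).foldl
          (fun (nd : List Int) (x : Int) =>
            nd.set x.toNat (nd.getD x.toNat 0 + PySem.List.pyGetD d (x - max 0 (li + 1)) 0))
          ((s.zip ((pp.zip ib).foldl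
              (fun (a : List Int) (q : Int × Int) =>
                if 0 ≤ q.2 ∧ q.2 < (s.length : Int) then
                  a.set q.2.toNat (a.getD q.2.toNat 0 + q.1)
                else a)
              (List.replicate s.length 0))).map (fun q => q.1 + q.2)) := rfl

theorem embedding_alt_char (pp ib s d : List Int) (li : Int) :
    (embedding_alt pp ib s d li).length = s.length
      ∧ ∀ j : Nat, j < s.length →
        (embedding_alt pp ib s d li).getD j 0
          = s.getD j 0 + paySumB pp ib (j : Int) + divAdd d li (j : Int) := by
  have hadd := foldl_guard_set
    (fun q : Int × Int => 0 ≤ q.2 ∧ q.2 < (s.length : Int))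
    (fun q => q.2.toNat) (fun q => q.1)
    (pp.zip ib) (List.replicate s.length 0)
    (by intro q _ hq; simp only [List.length_replicate]; omega)
  set add := (pp.zip ib).foldl
    (fun (a : List Int) (q : Int × Int) =>
      if 0 ≤ q.2 ∧ q.2 < (s.length : Int) then
        a.set q.2.toNat (a.getD q.2.toNat 0 + q.1)
      else a)
    (List.replicate s.length 0) with hadddef
  have haddlen : add.length = s.length := by rw [hadddef, hadd.1, List.length_replicate]
  have haddval : ∀ j : Nat, j < s.length → add.getD j 0 = paySumB pp ib (j : Int) := by
    intro j hj
    rw [hadddef, hadd.2 j]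
    have he : (pp.zip ib).filter
          (fun (a : Int × Int) => decide ((0 ≤ a.2 ∧ a.2 < (s.length : Int)) ∧ a.2.toNat = j))
        = (pp.zip ib).filter (fun (q : Int × Int) => decide (q.2 = (j : Int))) := by
      apply List.filter_congr; intro q _
      simp only [decide_eq_decide]
      omega
    rw [he]
    simp [paySumB]
  set nw := (s.zip add).map (fun q : Int × Int => q.1 + q.2) with hnwdef
  have hnwlen : nw.length = s.length := by
    rw [hnwdef]; simp [List.length_zip, haddlen]
  have hnwval : ∀ j : Nat, j < s.length →
      nw.getD j 0 = s.getD j 0 + paySumB pp ib (j : Int) := by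
    intro j hj
    have hj1 : j < nw.length := by omega
    have hj2 : j < (s.zip add).length := by simp [List.length_zip]; omega
    rw [List.getD_eq_getElem _ _ hj1]
    have ha : add[j]'(by omega) = paySumB pp ib (j : Int) :=
      (List.getD_eq_getElem add 0 (by omega)).symm.trans (haddval j hj)
    have hs : s[j]'hj = s.getD j 0 := (List.getD_eq_getElem s 0 hj).symm
    simp only [hnwdef, List.getElem_map, List.getElem_zip, ha, hs]
  have hk : ∀ x ∈ PySem.List.pyRange (max 0 (li + 1)) (min (s.length : Int) (li + d.length)) 1,
      x.toNat < nw.length := by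
    intro x hx
    rw [PySem.List.mem_pyRange_one] at hx
    omega
  have hfin := foldl_set_add (fun x : Int => x.toNat)
    (fun x => PySem.List.pyGetD d (x - max 0 (li + 1)) 0)
    (PySem.List.pyRange (max 0 (li + 1)) (min (s.length : Int) (li + d.length)) 1) nw hk
  constructor
  · rw [embedding_alt_eq]
    exact hfin.1.trans hnwlen
  · intro j hj
    rw [embedding_alt_eq, hfin.2 j, hnwval j hj]
    have hflt := filter_pyRange_toNat j
      ((min (s.length : Int) (li + d.length) - max 0 (li + 1)).toNat)
      (max 0 (li + 1)) (min (s.length : Int) (li + d.length)) (by omega) rfl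
    have he : (PySem.List.pyRange (max 0 (li + 1)) (min (s.length : Int) (li + d.length)) 1).filter
          (fun (a : Int) => decide ((fun x : Int => x.toNat) a = j))
        = (PySem.List.pyRange (max 0 (li + 1)) (min (s.length : Int) (li + d.length)) 1).filter
          (fun (x : Int) => decide (x.toNat = j)) := rfl
    rw [he, hflt]
    by_cases hc : li < (j : Int) ∧ (j : Int) < li + d.length
    · have hcond : max 0 (li + 1) ≤ (j : Int) ∧ (j : Int) < min (s.length : Int) (li + d.length) := by
        omega
      rw [if_pos hcond]
      have : divAdd d li (j : Int) = PySem.List.pyGetD d ((j : Int) - max 0 (li + 1)) 0 := by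
        rw [divAdd, if_pos hc]; rfl
      rw [this]
      simp [add_assoc]
    · have hcond : ¬ (max 0 (li + 1) ≤ (j : Int) ∧ (j : Int) < min (s.length : Int) (li + d.length)) := by
        omega
      rw [if_neg hcond]
      have : divAdd d li (j : Int) = 0 := by rw [divAdd, if_neg hc]
      rw [this]
      simp [add_assoc]

-- ===== VERDICT (by name: the statement is the Claim_ definition above) =====
theorem embedding_spec : Claim_equal_embedding := by
  intro pp ib s d li _ _
  unfold Spec_embedding
  have hA := embedding_char pp ib s d li s.length le_rfl
  have hB := embedding_alt_char pp ib s d li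
  have hlenA : (embedding pp ib s d li).length = s.length := by
    rw [embedding_eq_stepA]; exact hA.1
  apply List.ext_getElem (by rw [hlenA, hB.1])
  intro j hj1 hj2
  have hjs : j < s.length := by rwa [hlenA] at hj1
  have e1 : (embedding pp ib s d li).getD j 0
      = s.getD j 0 + paySumA pp ib (j : Int) + divAdd d li (j : Int) := by
    rw [embedding_eq_stepA, hA.2.2 j]
    simp [hjs, add_assoc]
  have e2 := hB.2 j hjs
  rw [List.getD_eq_getElem _ _ hj1] at e1
  rw [List.getD_eq_getElem _ _ hj2] at e2
  rw [e1, e2, paySum_eq]
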